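-- pv_equiv track=rewrite | github.com/dexuri18/Assignment_Python | count_kmers2.py | wrong_character
-- ===== SOURCE A (Python) =====
-- def wrong_character(seq):
--     bad_char = {}
--     for al in seq:
--         if al not in 'GCAT':
--             if al in bad_char: bad_char[ al ] += 1
--             else: bad_char[ al ] = 1
--     if bad_char != {}:
--         return bad_char
-- ===== SOURCE B (Python) =====
-- def wrong_character(seq):
--     def counts(s):
--         if len(s) <= 1:
--             return {s: 1} if s and s not in 'GCAT' else {}
--         mid = len(s) // 2
--         left = counts(s[:mid])
--         right = counts(s[mid:])
--         for k, v in right.items():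
--             left[k] = left.get(k, 0) + v
--         return left
--     bad = counts(seq)
--     return bad if bad else None
-- ===== Notes on version B (the rewrite author's own statement) =====
-- stated objective: alternative
-- what changed: Replaces A's single left-to-right incrementing pass with a divide-and-conquer recursion: split the string in half, count bad characters in each half recursively, and merge the two count dicts (adding counts, appending new keys), which preserves first-occurrence order.
import Mathlib
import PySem

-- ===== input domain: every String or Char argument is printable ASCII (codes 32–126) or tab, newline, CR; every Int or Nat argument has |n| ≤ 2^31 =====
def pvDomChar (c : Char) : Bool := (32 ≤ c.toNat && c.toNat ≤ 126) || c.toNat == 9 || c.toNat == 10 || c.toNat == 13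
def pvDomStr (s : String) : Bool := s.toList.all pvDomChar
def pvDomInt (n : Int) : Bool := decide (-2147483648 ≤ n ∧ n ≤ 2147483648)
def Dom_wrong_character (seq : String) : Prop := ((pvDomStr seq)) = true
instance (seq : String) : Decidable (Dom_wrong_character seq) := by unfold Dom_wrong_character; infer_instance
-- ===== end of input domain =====

-- B replaces A's single incrementing pass with a divide-and-conquer recursion (count halves,
-- merge the two dicts); same return value, no side effects; objective: alternative.

-- ===== PORT A =====
-- iterating a Python str yields 1-char strings: we fold over the chars and key the dict by the
-- 1-char string; `al not in 'GCAT'` for a 1-char al is exactly char membership.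
def wrong_character (seq : String) : Option (List (String × Int)) :=
  let bad : PySem.Dict String Int :=
    seq.toList.foldl (fun d al =>
      if !("GCAT".toList.contains al) then
        if d.contains (String.ofList [al]) then
          d.insert (String.ofList [al]) (d.getD (String.ofList [al]) 0 + 1)
        else d.insert (String.ofList [al]) 1
      else d) PySem.Dict.empty
  if bad.items ≠ [] then some bad.items else none

-- ===== PORT B =====
-- counts(s): base case a 0/1-char string (`{s: 1} if s and s not in 'GCAT' else {}`),
-- otherwise split at len//2, recurse on both halves, and merge right's items into left
-- with `left[k] = left.get(k, 0) + v`.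
def pvCountsB (s : List Char) : PySem.Dict String Int :=
  if h : s.length ≤ 1 then
    match s with
    | [] => PySem.Dict.empty
    | c :: _ =>
      if "GCAT".toList.contains c then PySem.Dict.empty
      else PySem.Dict.empty.insert (String.ofList [c]) 1
  else
    let mid := s.length / 2
    let left := pvCountsB (s.take mid)
    let right := pvCountsB (s.drop mid)
    right.items.foldl (fun d kv => d.insert kv.1 (d.getD kv.1 0 + kv.2)) left
termination_by s.length
decreasing_by
  · simp only [List.length_take]; omega
  · simp only [List.length_drop]; omega

def wrong_character_alt (seq : String) : Option (List (String × Int)) :=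
  let bad := pvCountsB seq.toList
  if bad.items ≠ [] then some bad.items else none

-- ===== PRECONDITION & SPEC =====
def Spec_wrong_character (seq : String) (out : Option (List (String × Int))) : Prop := out = wrong_character_alt seq
instance (seq : String) (out : Option (List (String × Int))) : Decidable (Spec_wrong_character seq out) := by unfold Spec_wrong_character; infer_instance

-- ===== CLAIM (what is proved, stated in full; the proofs are below) =====
def Claim_equal_wrong_character : Prop := ∀ (seq : String), Dom_wrong_character seq → Spec_wrong_character seq (wrong_character seq)

-- ===== LEMMAS AND PROOFS =====

-- the "bad keys" of a char list: 1-char strings of the non-GCAT chars, in order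
def pvKeys (s : List Char) : List String :=
  (s.filter (fun c => !("GCAT".toList.contains c))).map (fun c => String.ofList [c])

theorem pvKeys_append (xs ys : List Char) : pvKeys (xs ++ ys) = pvKeys xs ++ pvKeys ys := by
  simp [pvKeys, List.filter_append]

-- getD after merging an item list into d
theorem getD_merge (l : List (String × Int)) (d : PySem.Dict String Int) (v : String) :
    (l.foldl (fun d kv => d.insert kv.1 (d.getD kv.1 0 + kv.2)) d).getD v 0
      = d.getD v 0 + ((l.filter (fun kv => kv.1 == v)).map Prod.snd).sum := by
  induction l generalizing d with
  | nil => simp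
  | cons kv l ih =>
    rw [List.foldl_cons, ih]
    by_cases h : kv.1 = v
    · simp [h]
      ring
    · simp [h, PySem.Dict.getD_insert, Ne.symm h]

-- the items of a counter, filtered down to one key, sum to that key's count
theorem sum_counter_filter {α : Type} [DecidableEq α] (ys : List α) (v : α) :
    ((((PySem.Set.ofList ys).map (fun k => (k, (ys.count k : Int)))).filter
        (fun kv => kv.1 == v)).map Prod.snd).sum = (ys.count v : Int) := by
  rw [List.filter_map, List.map_map]
  have : ((PySem.Set.ofList ys).filter (fun k => k == v)) =
      if v ∈ ys then [v] else [] := by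
    rw [List.filter_beq]
    have hnd := PySem.Set.nodup_ofList (xs := ys)
    by_cases hm : v ∈ ys
    · have hmem : v ∈ PySem.Set.ofList ys := (PySem.Set.mem_ofList ys v).mpr hm
      have h1 : (PySem.Set.ofList ys).count v = 1 :=
        List.count_eq_one_of_mem hnd hmem
      simp [hm, h1]
    · have hmem : v ∉ PySem.Set.ofList ys := fun h => hm ((PySem.Set.mem_ofList ys v).mp h)
      simp [hm, List.count_eq_zero_of_not_mem hmem]
  simp only [Function.comp_def] at this ⊢
  rw [this]
  by_cases hm : v ∈ ys
  · simp [hm]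
  · simp [hm, List.count_eq_zero_of_not_mem hm]

-- Set.update with a deduplicated second argument is the same update
theorem update_ofList (s : PySem.Set String) (ys : List String) :
    PySem.Set.update s (PySem.Set.ofList ys) = PySem.Set.update s ys := by
  rw [PySem.Set.update_eq_append_filter, PySem.Set.update_eq_append_filter,
      PySem.Set.ofList_ofList]

-- merging two counters is the counter of the concatenation
theorem merge_counter (xs ys : List String) :
    (PySem.Dict.counter ys).items.foldl
        (fun d kv => d.insert kv.1 (d.getD kv.1 0 + kv.2)) (PySem.Dict.counter xs)
      = PySem.Dict.counter (xs ++ ys) := by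
  have hndL : ((PySem.Dict.counter ys).items.foldl
      (fun d kv => d.insert kv.1 (d.getD kv.1 0 + kv.2))
      (PySem.Dict.counter xs)).keys.Nodup :=
    PySem.Dict.nodup_keys_foldl_insert_key _ Prod.fst _ _ (PySem.Dict.nodup_keys_counter _)
  have hndR : (PySem.Dict.counter (xs ++ ys) : PySem.Dict String Int).keys.Nodup :=
    PySem.Dict.nodup_keys_counter _
  have hkeys : ((PySem.Dict.counter ys).items.foldl
      (fun d kv => d.insert kv.1 (d.getD kv.1 0 + kv.2))
      (PySem.Dict.counter xs)).keys
      = (PySem.Dict.counter (xs ++ ys) : PySem.Dict String Int).keys := by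
    rw [PySem.Dict.keys_foldl_insert_key _ Prod.fst]
    have : (PySem.Dict.counter ys).items.map Prod.fst
        = (PySem.Dict.counter ys : PySem.Dict String Int).keys := rfl
    rw [this, PySem.Dict.keys_counter, PySem.Dict.keys_counter,
        PySem.Dict.keys_counter, PySem.Set.ofList_append, update_ofList]
  have hgetD : ∀ v, ((PySem.Dict.counter ys).items.foldl
      (fun d kv => d.insert kv.1 (d.getD kv.1 0 + kv.2))
      (PySem.Dict.counter xs)).getD v 0
      = (PySem.Dict.counter (xs ++ ys) : PySem.Dict String Int).getD v 0 := by
    intro v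
    rw [getD_merge, PySem.Dict.getD_counter, PySem.Dict.getD_counter,
        PySem.Dict.items_counter, sum_counter_filter, List.count_append]
    push_cast
    ring
  apply PySem.Dict.ext
  rw [PySem.Dict.items_eq_map_keys _ hndL 0, PySem.Dict.items_eq_map_keys _ hndR 0, hkeys]
  exact List.map_congr_left (fun k _ => by rw [hgetD k])

-- B's divide-and-conquer counts equal the counter of the bad keys
theorem pvCountsB_eq_counter (s : List Char) :
    pvCountsB s = PySem.Dict.counter (pvKeys s) := by
  induction hn : s.length using Nat.strong_induction_on generalizing s with
  | _ n ih =>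
  rw [pvCountsB]
  by_cases h : s.length ≤ 1
  · rw [dif_pos h]
    match s with
    | [] => rfl
    | [c] =>
      have hk : pvKeys [c] = if ("GCAT".toList.contains c) = true then []
          else [String.ofList [c]] := by
        by_cases hc : ("GCAT".toList.contains c) = true
        · have h4 : c = 'G' ∨ c = 'C' ∨ c = 'A' ∨ c = 'T' := by simpa using hc
          rw [if_pos hc]
          rcases h4 with h4 | h4 | h4 | h4 <;> subst h4 <;> rfl
        · have h4 : ¬c = 'G' ∧ ¬c = 'C' ∧ ¬c = 'A' ∧ ¬c = 'T' := by
            simpa [not_or] using hc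
          rw [if_neg hc]
          simp [pvKeys, h4.1, h4.2.1, h4.2.2.1, h4.2.2.2]
      show (if ("GCAT".toList.contains c) = true then PySem.Dict.empty
          else PySem.Dict.empty.insert (String.ofList [c]) 1)
        = PySem.Dict.counter (pvKeys [c])
      by_cases hc : ("GCAT".toList.contains c) = true
      · rw [if_pos hc, hk, if_pos hc]; rfl
      · rw [if_neg hc, hk, if_neg hc, ← PySem.Dict.foldl_insert_getD_add_one_eq_counter]
        simp only [List.foldl_cons, List.foldl_nil, PySem.Dict.getD_empty]
        norm_num
    | c :: c' :: rest => simp at h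
  · rw [dif_neg h]
    simp only []
    have h2 : 2 ≤ s.length := by omega
    have hmid1 : 1 ≤ s.length / 2 := by omega
    have hmid2 : s.length / 2 < s.length := by omega
    rw [ih (s.take (s.length / 2)).length (by subst hn; simp; omega) _ rfl,
        ih (s.drop (s.length / 2)).length (by subst hn; simp; omega) _ rfl,
        merge_counter, ← pvKeys_append, List.take_append_drop]

-- A's loop builds the same counter
theorem wrong_character_dict_eq (s : List Char) :
    s.foldl (fun d al =>
      if !("GCAT".toList.contains al) then
        if d.contains (String.ofList [al]) then
          d.insert (String.ofList [al]) (d.getD (String.ofList [al]) 0 + 1)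
        else d.insert (String.ofList [al]) 1
      else d) (PySem.Dict.empty : PySem.Dict String Int)
    = PySem.Dict.counter (pvKeys s) := by
  rw [PySem.List.foldl_if_eq_foldl_filter]
  have hstep : ∀ (d : PySem.Dict String Int) (al : Char),
      (if d.contains (String.ofList [al]) then
        d.insert (String.ofList [al]) (d.getD (String.ofList [al]) 0 + 1)
      else d.insert (String.ofList [al]) 1)
      = d.insert (String.ofList [al]) (d.getD (String.ofList [al]) 0 + 1) := by
    intro d al
    by_cases h : d.contains (String.ofList [al]) = true
    · simp [h]
    · have hf : d.contains (String.ofList [al]) = false := by simpa using h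
      simp [hf, PySem.Dict.getD_of_not_contains]
  simp only [hstep]
  rw [← List.foldl_map (f := fun c : Char => String.ofList [c])
        (g := fun (d : PySem.Dict String Int) x => d.insert x (d.getD x 0 + 1)),
      PySem.Dict.foldl_insert_getD_add_one_eq_counter]
  rfl

-- ===== VERDICT (by name: the statement is the Claim_ definition above) =====
theorem wrong_character_spec : Claim_equal_wrong_character := by
  intro seq _
  unfold Spec_wrong_character wrong_character wrong_character_alt
  rw [wrong_character_dict_eq, pvCountsB_eq_counter]
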